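-- pv_equiv track=rewrite | github.com/2149-SRUTHI-S/Turing-Machine-Simulator | Turing_Machine Simulator/main.py | accepts_odd_ones_even_zeros
-- ===== SOURCE A (Python) =====
-- def accepts_odd_ones_even_zeros(string):
-- 	state = 0
-- 	for symbol in string:
-- 		if state == 0:
-- 			if symbol == '0':
-- 				state = 2
-- 			elif symbol == '1':
-- 				state = 1
-- 			else:
-- 				return False
-- 		elif state == 1:
-- 			if symbol == '0':
-- 				state = 3
-- 			elif symbol == '1':
-- 				state = 0
-- 			else:
-- 				return False
-- 		elif state == 2:
-- 			if symbol == '0':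
-- 				state = 0
-- 			elif symbol == '1':
-- 				state = 3
-- 			else:
-- 				return False
-- 		elif state == 3:
-- 			if symbol == '0':
-- 				state = 1
-- 			elif symbol == '1':
-- 				state = 2
-- 			else:
-- 				return False
-- 	return state == 1
-- ===== SOURCE B (Python) =====
-- def accepts_odd_ones_even_zeros(string):
--     if any(c not in '01' for c in string):
--         return False
--     return string.count('1') % 2 == 1 and string.count('0') % 2 == 0
-- ===== Notes on version B (the rewrite author's own statement) =====
-- stated objective: simpler
-- what changed: Replaces the single-pass 4-state DFA simulation with staged whole-string passes: a validation pass (any character outside '01' gives False) followed by str.count-based parity tests of the counts of '1' and '0'; no per-symbol automaton state is maintained.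
import Mathlib
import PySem

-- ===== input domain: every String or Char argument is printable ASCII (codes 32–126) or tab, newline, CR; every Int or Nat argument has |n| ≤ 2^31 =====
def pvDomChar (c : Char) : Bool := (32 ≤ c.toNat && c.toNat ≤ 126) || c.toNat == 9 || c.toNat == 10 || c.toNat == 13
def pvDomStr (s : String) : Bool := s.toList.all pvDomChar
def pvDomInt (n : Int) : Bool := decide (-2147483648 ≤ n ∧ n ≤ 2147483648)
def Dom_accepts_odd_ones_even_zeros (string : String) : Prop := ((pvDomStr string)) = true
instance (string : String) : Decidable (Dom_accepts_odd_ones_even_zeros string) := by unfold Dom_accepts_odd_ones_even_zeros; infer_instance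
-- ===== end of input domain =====

-- B replaces A's single-pass 4-state DFA with staged passes: a validity scan, then parity tests of the '1'/'0' counts (objective: simpler).


-- ===== PORT A =====
-- for-loop over the symbols with an early return: the DFA state is carried through a
-- recursion; an invalid symbol returns false, end of string returns state == 1 (as in A).
def pvLoopA : Int → List Char → Bool
  | state, [] => state == 1
  | state, c :: cs =>
      if state == 0 then
        if c == '0' then pvLoopA 2 cs
        else if c == '1' then pvLoopA 1 cs
        else false
      else if state == 1 then
        if c == '0' then pvLoopA 3 cs
        else if c == '1' then pvLoopA 0 cs
        else false
      else if state == 2 then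
        if c == '0' then pvLoopA 0 cs
        else if c == '1' then pvLoopA 3 cs
        else false
      else if state == 3 then
        if c == '0' then pvLoopA 1 cs
        else if c == '1' then pvLoopA 2 cs
        else false
      else pvLoopA state cs

def accepts_odd_ones_even_zeros (string : String) : Bool :=
  pvLoopA 0 string.toList

-- ===== PORT B =====
-- B: staged passes — `any(c not in '01' for c in string)` then `string.count('1')`/`string.count('0')`
-- (str.count ported as PySem.Str.count); no automaton state.
def accepts_odd_ones_even_zeros_alt (string : String) : Bool :=
  if string.toList.any (fun c => !(c == '0' || c == '1')) then false
  else decide (PySem.Str.count string "1" % 2 = 1) && decide (PySem.Str.count string "0" % 2 = 0)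

-- ===== PRECONDITION & SPEC =====
def Spec_accepts_odd_ones_even_zeros (string : String) (out : Bool) : Prop := out = accepts_odd_ones_even_zeros_alt string
instance (string : String) (out : Bool) : Decidable (Spec_accepts_odd_ones_even_zeros string out) := by unfold Spec_accepts_odd_ones_even_zeros; infer_instance

-- ===== CLAIM (what is proved, stated in full; the proofs are below) =====
def Claim_equal_accepts_odd_ones_even_zeros : Prop := ∀ (string : String), Dom_accepts_odd_ones_even_zeros string → Spec_accepts_odd_ones_even_zeros string (accepts_odd_ones_even_zeros string)

-- ===== LEMMAS AND PROOFS =====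

-- PySem.Chars.count on a single-character needle is plain List.count
theorem count_go_single (c : Char) (fuel : Nat) :
    ∀ (l : List Char) (acc : Nat), l.length ≤ fuel →
      PySem.Chars.count.go [c] fuel l acc = acc + l.count c := by
  induction fuel with
  | zero =>
      intro l acc h
      match l with
      | [] => simp [PySem.Chars.count.go]
      | _ :: _ => simp at h
  | succ n ih =>
      intro l acc h
      match l with
      | [] => simp [PySem.Chars.count.go]
      | a :: t =>
          simp only [PySem.Chars.count.go, List.isPrefixOf]
          by_cases hc : c = a
          · subst hc
            simp only [BEq.rfl, Bool.true_and, List.isPrefixOf, if_pos, List.length_cons,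
              List.drop_succ_cons, List.length_nil, List.drop_zero]
            rw [ih t (acc+1) (by simpa using h)]
            simp [List.count_cons]
            omega
          · have hba : (c == a) = false := by simp [hc]
            simp only [hba, Bool.false_and, if_neg, Bool.false_eq_true, not_false_iff]
            rw [ih t acc (by simpa using h)]
            simp [List.count_cons, Ne.symm hc]

theorem str_count_single (s : List Char) (c : Char) :
    PySem.Chars.count s [c] = s.count c := by
  simp [PySem.Chars.count, count_go_single c s.length s 0 (le_refl _)]

-- state encoding: DFA state = (if oddOnes then 1 else 0) + (if oddZeros then 2 else 0);
-- A's loop computes validity of the suffix together with the final parities of the counts.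
theorem pvLoopA_counts (cs : List Char) : ∀ (o z : Bool),
    pvLoopA ((if o then (1:Int) else 0) + (if z then 2 else 0)) cs
      = (cs.all (fun c => c == '0' || c == '1')
          && decide ((cs.count '1' + (if o then 1 else 0)) % 2 = 1)
          && decide ((cs.count '0' + (if z then 1 else 0)) % 2 = 0)) := by
  induction cs with
  | nil => intro o z; cases o <;> cases z <;> simp [pvLoopA]
  | cons c cs ih =>
      intro o z
      have i0 := ih false false
      have i1 := ih true false
      have i2 := ih false true
      have i3 := ih true true
      norm_num at i0 i1 i2 i3
      cases o <;> cases z <;>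
        by_cases h0 : c = '0' <;> by_cases h1 : c = '1' <;>
        first
          | (exact absurd (h0.symm.trans h1) (by decide))
          | (norm_num [pvLoopA, h0, h1, i0, i1, i2, i3, List.count_cons,
               (show ¬('1':Char) = '0' by decide), (show ¬('0':Char) = '1' by decide)] <;>
             first
               | rfl
               | (congr 1 <;>
                  first
                    | rfl
                    | (rw [decide_eq_decide]; omega)
                    | (congr 1 <;>
                       first
                         | rfl
                         | (rw [decide_eq_decide]; omega))))

-- ===== VERDICT (by name: the statement is the Claim_ definition above) =====
theorem accepts_odd_ones_even_zeros_spec : Claim_equal_accepts_odd_ones_even_zeros := by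
  intro s _
  unfold Spec_accepts_odd_ones_even_zeros accepts_odd_ones_even_zeros accepts_odd_ones_even_zeros_alt
  have h := pvLoopA_counts s.toList false false
  norm_num at h
  have ha : (s.toList.any fun c => !(c == '0' || c == '1'))
      = !(s.toList.all fun c => c == '0' || c == '1') := by
    rw [List.all_eq_not_any_not, Bool.not_not]
  rw [h, PySem.Str.count_eq, PySem.Str.count_eq]
  simp only [show ("1" : String).toList = ['1'] from rfl,
    show ("0" : String).toList = ['0'] from rfl, str_count_single, ha]
  cases s.toList.all fun c => c == '0' || c == '1' <;> simp
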